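-- pv_equiv track=rewrite | github.com/rawagiha/variantPost | variantpost/phaser.py | parse_contig_for_exons
-- ===== SOURCE A (Python) =====
-- def parse_contig_for_exons(contig_dict, skips):
--     contig_start = list(contig_dict.items())[0][0]
--     contig_end = list(contig_dict.items())[-1][0]
--
--     exon_start = contig_start
--     exon_end = contig_end
--     exons = []
--     for skip in skips:
--         exon_end = skip[0] - 1
--         exons.append((exon_start, exon_end))
--         exon_start = skip[1] + 1
--         exon_end = contig_end
--
--     exons.append((exon_start, exon_end))
--
--     return contig_start, contig_end, exons
-- ===== SOURCE B (Python) =====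
-- def _exons_between(start, end, skips):
--     if not skips:
--         return [(start, end)]
--     (a, b), rest = skips[0], skips[1:]
--     return [(start, a - 1)] + _exons_between(b + 1, end, rest)
--
--
-- def parse_contig_for_exons(contig_dict, skips):
--     keys = list(contig_dict)
--     contig_start = keys[0]
--     contig_end = keys[-1]
--     return contig_start, contig_end, _exons_between(contig_start, contig_end, skips)
-- ===== Notes on version B (the rewrite author's own statement) =====
-- stated objective: simpler
-- what changed: Replaces the stateful loop threading exon_start/exon_end through an accumulator with a recursive helper that consumes the skip list and builds the exon list by structural recursion.
import Mathlib
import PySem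

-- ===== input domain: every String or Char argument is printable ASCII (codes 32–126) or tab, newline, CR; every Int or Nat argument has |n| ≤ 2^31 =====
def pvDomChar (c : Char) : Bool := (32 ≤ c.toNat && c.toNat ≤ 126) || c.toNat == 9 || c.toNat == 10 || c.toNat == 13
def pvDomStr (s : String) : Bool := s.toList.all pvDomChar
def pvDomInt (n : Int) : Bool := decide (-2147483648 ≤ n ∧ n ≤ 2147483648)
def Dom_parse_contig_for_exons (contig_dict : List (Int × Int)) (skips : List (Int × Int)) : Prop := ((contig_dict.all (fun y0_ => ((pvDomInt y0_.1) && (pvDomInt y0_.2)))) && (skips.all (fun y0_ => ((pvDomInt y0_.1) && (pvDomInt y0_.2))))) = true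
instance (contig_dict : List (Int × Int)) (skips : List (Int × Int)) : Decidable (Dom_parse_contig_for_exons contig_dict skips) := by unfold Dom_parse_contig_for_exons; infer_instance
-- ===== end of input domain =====

-- B replaces A's stateful sweep with a recursive helper over the skip list (objective: simpler decomposition).
-- ===== PORT A =====
def parse_contig_for_exons (contig_dict : List (Int × Int)) (skips : List (Int × Int)) : Int × Int × (List (Int × Int)) :=
  match PySem.List.pyGet? contig_dict 0, PySem.List.pyGet? contig_dict (-1) with
  | some p0, some pl =>
    let contig_start := p0.1
    let contig_end := pl.1
    let st := skips.foldl
      (fun (s : Int × List (Int × Int)) skip =>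
        (skip.2 + 1, s.2 ++ [(s.1, skip.1 - 1)]))
      (contig_start, [])
    (contig_start, contig_end, st.2 ++ [(st.1, contig_end)])
  | _, _ => (0, 0, [])   -- unreachable under Pre_: Python raises IndexError here

-- ===== PORT B =====
def exons_between (start e : Int) (skips : List (Int × Int)) : List (Int × Int) :=
  match skips with
  | [] => [(start, e)]
  | (a, b) :: rest => [(start, a - 1)] ++ exons_between (b + 1) e rest

def parse_contig_for_exons_alt (contig_dict : List (Int × Int)) (skips : List (Int × Int)) : Int × Int × (List (Int × Int)) :=
  (((PySem.List.pyGet? contig_dict 0).bind fun p0 =>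
    (PySem.List.pyGet? contig_dict (-1)).map fun pl =>
      (p0.1, pl.1, exons_between p0.1 pl.1 skips)).getD
    (0, 0, []))   -- unreachable under Pre_: Python raises IndexError here

-- ===== PRECONDITION & SPEC =====
-- Pre_ excludes only the empty dict, on which both A and B raise IndexError.
def Pre_parse_contig_for_exons (contig_dict : List (Int × Int)) (skips : List (Int × Int)) : Prop :=
  contig_dict ≠ []
instance (contig_dict : List (Int × Int)) (skips : List (Int × Int)) : Decidable (Pre_parse_contig_for_exons contig_dict skips) := by unfold Pre_parse_contig_for_exons; infer_instance
def pvWitness_parse_contig_for_exons : (List (Int × Int)) × (List (Int × Int)) := ([(1, 0), (10, 0)], [(3, 5)])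
def Spec_parse_contig_for_exons (contig_dict : List (Int × Int)) (skips : List (Int × Int)) (out : Int × Int × (List (Int × Int))) : Prop := out = parse_contig_for_exons_alt contig_dict skips
instance (contig_dict : List (Int × Int)) (skips : List (Int × Int)) (out : Int × Int × (List (Int × Int))) : Decidable (Spec_parse_contig_for_exons contig_dict skips out) := by unfold Spec_parse_contig_for_exons; infer_instance

-- ===== CLAIM =====
def Claim_equal_parse_contig_for_exons : Prop := ∀ (contig_dict : List (Int × Int)) (skips : List (Int × Int)), Dom_parse_contig_for_exons contig_dict skips → Pre_parse_contig_for_exons contig_dict skips → Spec_parse_contig_for_exons contig_dict skips (parse_contig_for_exons contig_dict skips)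

-- ===== LEMMAS AND PROOFS =====
theorem exons_fold_eq_rec (skips : List (Int × Int)) (cs ce : Int) (acc : List (Int × Int)) :
    (skips.foldl
        (fun (s : Int × List (Int × Int)) skip =>
          (skip.2 + 1, s.2 ++ [(s.1, skip.1 - 1)]))
        (cs, acc)).2
      ++ [((skips.foldl
        (fun (s : Int × List (Int × Int)) skip =>
          (skip.2 + 1, s.2 ++ [(s.1, skip.1 - 1)]))
        (cs, acc)).1, ce)]
    = acc ++ exons_between cs ce skips := by
  induction skips generalizing cs acc with
  | nil => simp [exons_between]
  | cons sk rest ih =>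
    simp only [List.foldl_cons]
    rw [ih]
    simp [exons_between]

-- ===== VERDICT =====
theorem parse_contig_for_exons_spec : Claim_equal_parse_contig_for_exons := by
  intro contig_dict skips _ hpre
  unfold Spec_parse_contig_for_exons parse_contig_for_exons parse_contig_for_exons_alt
  cases h0 : PySem.List.pyGet? contig_dict 0 with
  | none =>
    cases contig_dict with
    | nil => exact absurd rfl hpre
    | cons a t => simp [PySem.List.pyGet?, PySem.List.pyIdx?] at h0
  | some p0 =>
    cases hl : PySem.List.pyGet? contig_dict (-1) with
    | none =>
      cases contig_dict with
      | nil => exact absurd rfl hpre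
      | cons a t => simp [PySem.List.pyGet?, PySem.List.pyIdx?] at hl
    | some pl =>
      simpa using exons_fold_eq_rec skips p0.1 pl.1 []
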